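-- pv_equiv track=rewrite | github.com/anupyadav27/threat-engine | engines/encryption-security/encryption_security_engine/analyzer/posture_scorer.py | _get_algorithm_score
-- ===== SOURCE A (Python) =====
-- ALGORITHM_SCORES = {
--     # Symmetric
--     "AES-256": 100, "AES_256": 100, "aws:kms": 95,
--     "SYMMETRIC_DEFAULT": 95,
--     "AES-128": 70, "AES_128": 70,
--     # Asymmetric RSA
--     "RSA_4096": 100, "RSA-4096": 100,
--     "RSA_3072": 90, "RSA-3072": 90,
--     "RSA_2048": 80, "RSA-2048": 80,
--     "RSA_1024": 30, "RSA-1024": 30,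
--     # Elliptic Curve
--     "EC_secp384r1": 100, "ECC_NIST_P384": 100,
--     "EC_prime256v1": 95, "ECC_NIST_P256": 95,
--     "ECC_SECG_P256K1": 90,
--     # Deprecated / weak
--     "DES": 0, "3DES": 10, "RC4": 0, "MD5": 0,
-- }
--
-- DEFAULT_ALGORITHM_SCORE = 50  # Unknown algorithms
--
-- def _get_algorithm_score(algorithm: str) -> int:
--     """Look up algorithm strength score."""
--     if not algorithm:
--         return DEFAULT_ALGORITHM_SCORE
--     # Try exact match first, then case-insensitive
--     score = ALGORITHM_SCORES.get(algorithm)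
--     if score is not None:
--         return score
--     for key, val in ALGORITHM_SCORES.items():
--         if key.lower() == algorithm.lower():
--             return val
--     return DEFAULT_ALGORITHM_SCORE
-- ===== SOURCE B (Python) =====
-- DEFAULT_ALGORITHM_SCORE = 50  # Unknown algorithms
--
-- # Sorted table of (lowercased key, score); all lowercased keys are distinct,
-- # so case-insensitive lookup by binary search reproduces A's exact-then-
-- # case-insensitive matching.
-- _SORTED_TABLE = [
--     ("3des", 10), ("aes-128", 70), ("aes-256", 100), ("aes_128", 70),
--     ("aes_256", 100), ("aws:kms", 95), ("des", 0), ("ec_prime256v1", 95),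
--     ("ec_secp384r1", 100), ("ecc_nist_p256", 95), ("ecc_nist_p384", 100),
--     ("ecc_secg_p256k1", 90), ("md5", 0), ("rc4", 0), ("rsa-1024", 30),
--     ("rsa-2048", 80), ("rsa-3072", 90), ("rsa-4096", 100), ("rsa_1024", 30),
--     ("rsa_2048", 80), ("rsa_3072", 90), ("rsa_4096", 100),
--     ("symmetric_default", 95),
-- ]
--
-- def _bsearch(key):
--     lo, hi = 0, len(_SORTED_TABLE)
--     while lo < hi:
--         mid = (lo + hi) // 2
--         k, v = _SORTED_TABLE[mid]
--         if k == key: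
--             return v
--         if k < key:
--             lo = mid + 1
--         else:
--             hi = mid
--     return None
--
-- def _get_algorithm_score(algorithm: str) -> int:
--     """Look up algorithm strength score."""
--     if not algorithm:
--         return DEFAULT_ALGORITHM_SCORE
--     score = _bsearch(algorithm.lower())
--     return DEFAULT_ALGORITHM_SCORE if score is None else score
-- ===== Notes on version B (the rewrite author's own statement) =====
-- stated objective: alternative
-- what changed: Replaces the exact-lookup-then-linear-scan over ALGORITHM_SCORES.items() with a hand-written binary search over a table of (lowercased key, score) pairs sorted once at module load (all lowercased keys are distinct, so first-match semantics are preserved).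
import Mathlib
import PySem

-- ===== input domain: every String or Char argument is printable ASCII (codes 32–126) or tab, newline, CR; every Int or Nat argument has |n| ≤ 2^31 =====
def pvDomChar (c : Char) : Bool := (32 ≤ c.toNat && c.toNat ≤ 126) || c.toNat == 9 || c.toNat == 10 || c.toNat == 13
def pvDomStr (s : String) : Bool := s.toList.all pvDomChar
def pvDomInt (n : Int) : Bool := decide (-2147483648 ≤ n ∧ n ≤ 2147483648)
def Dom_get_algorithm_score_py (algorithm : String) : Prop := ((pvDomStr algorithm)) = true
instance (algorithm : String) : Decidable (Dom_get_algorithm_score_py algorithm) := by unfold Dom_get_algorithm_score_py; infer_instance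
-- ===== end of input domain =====

-- B replaces A's exact-lookup-then-linear-scan with binary search over a table of
-- (lowercased key, score) sorted once (alternative; all lowercased keys are distinct,
-- so first-match semantics are preserved).

-- ===== PORT A =====
-- the module constant ALGORITHM_SCORES as a list of pairs in source order
def ALGORITHM_SCORES_LIST : List (String × Int) :=
  [("AES-256", 100), ("AES_256", 100), ("aws:kms", 95),
   ("SYMMETRIC_DEFAULT", 95),
   ("AES-128", 70), ("AES_128", 70),
   ("RSA_4096", 100), ("RSA-4096", 100),
   ("RSA_3072", 90), ("RSA-3072", 90),
   ("RSA_2048", 80), ("RSA-2048", 80),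
   ("RSA_1024", 30), ("RSA-1024", 30),
   ("EC_secp384r1", 100), ("ECC_NIST_P384", 100),
   ("EC_prime256v1", 95), ("ECC_NIST_P256", 95),
   ("ECC_SECG_P256K1", 90),
   ("DES", 0), ("3DES", 10), ("RC4", 0), ("MD5", 0)]

def ALGORITHM_SCORES : PySem.Dict String Int := PySem.Dict.mk ALGORITHM_SCORES_LIST

def DEFAULT_ALGORITHM_SCORE : Int := 50

-- the 'for key, val in ALGORITHM_SCORES.items(): if key.lower() == algorithm.lower(): return val' loop
def scanLowerA (algorithm : String) : List (String × Int) → Int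
  | [] => DEFAULT_ALGORITHM_SCORE
  | (key, val) :: rest =>
      if PySem.Str.lower key = PySem.Str.lower algorithm then val
      else scanLowerA algorithm rest

def get_algorithm_score_py (algorithm : String) : Int :=
  if algorithm = "" then DEFAULT_ALGORITHM_SCORE
  else
    match ALGORITHM_SCORES.get? algorithm with
    | some score => score
    | none => scanLowerA algorithm ALGORITHM_SCORES.items

-- ===== PORT B =====
-- _SORTED_TABLE: (lowercased key, score), sorted by key
def SORTED_TABLE : List (String × Int) :=
  [("3des", 10), ("aes-128", 70), ("aes-256", 100), ("aes_128", 70),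
   ("aes_256", 100), ("aws:kms", 95), ("des", 0), ("ec_prime256v1", 95),
   ("ec_secp384r1", 100), ("ecc_nist_p256", 95), ("ecc_nist_p384", 100),
   ("ecc_secg_p256k1", 90), ("md5", 0), ("rc4", 0), ("rsa-1024", 30),
   ("rsa-2048", 80), ("rsa-3072", 90), ("rsa-4096", 100), ("rsa_1024", 30),
   ("rsa_2048", 80), ("rsa_3072", 90), ("rsa_4096", 100),
   ("symmetric_default", 95)]

-- the while-loop of _bsearch; fuel = initial interval size bounds the iteration count
def bsearchAux (key : String) : Nat → Nat → Nat → Option Int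
  | 0, _, _ => none
  | fuel + 1, lo, hi =>
      if lo < hi then
        let mid := (lo + hi) / 2
        match SORTED_TABLE[mid]? with
        | none => none
        | some (k, v) =>
            if k = key then some v
            else if PySem.Chars.strLt k.toList key.toList then bsearchAux key fuel (mid + 1) hi
            else bsearchAux key fuel lo mid
      else none

def get_algorithm_score_py_alt (algorithm : String) : Int :=
  if algorithm = "" then DEFAULT_ALGORITHM_SCORE
  else
    match bsearchAux (PySem.Str.lower algorithm) SORTED_TABLE.length 0 SORTED_TABLE.length with
    | some v => v
    | none => DEFAULT_ALGORITHM_SCORE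

-- ===== PRECONDITION & SPEC =====
def Spec_get_algorithm_score_py (algorithm : String) (out : Int) : Prop := out = get_algorithm_score_py_alt algorithm
instance (algorithm : String) (out : Int) : Decidable (Spec_get_algorithm_score_py algorithm out) := by unfold Spec_get_algorithm_score_py; infer_instance

-- ===== CLAIM (what is proved, stated in full; the proofs are below) =====
def Claim_equal_get_algorithm_score_py : Prop := ∀ (algorithm : String), Dom_get_algorithm_score_py algorithm → Spec_get_algorithm_score_py algorithm (get_algorithm_score_py algorithm)

-- ===== LEMMAS AND PROOFS =====

-- case-insensitive first-match lookup by the ALREADY-lowered query string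
def lookLow (L : String) : List (String × Int) → Int
  | [] => DEFAULT_ALGORITHM_SCORE
  | (key, val) :: rest =>
      if PySem.Str.lower key = L then val else lookLow L rest

-- A's scan depends on the input only through its lowercase form
lemma scan_eq_lookLow (algorithm : String) (ps : List (String × Int)) :
    scanLowerA algorithm ps = lookLow (PySem.Str.lower algorithm) ps := by
  induction ps with
  | nil => rfl
  | cons p rest ih => obtain ⟨k, v⟩ := p; simp [scanLowerA, lookLow, ih]

lemma lowered_keys_nodup : (ALGORITHM_SCORES_LIST.map (fun p => PySem.Str.lower p.1)).Nodup := by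
  decide

-- a successful exact lookup is also found by the case-insensitive scan (lowered keys unique)
lemma scan_of_get?_eq_some (algorithm : String) (v : Int) (ps : List (String × Int))
    (hnd : (ps.map (fun p => PySem.Str.lower p.1)).Nodup)
    (hv : (PySem.Dict.mk ps).get? algorithm = some v) :
    scanLowerA algorithm ps = v := by
  induction ps with
  | nil => simp [PySem.Dict.get?] at hv
  | cons p rest ih =>
      obtain ⟨k, w⟩ := p
      rw [PySem.Dict.get?_mk_cons] at hv
      simp only [List.map_cons, List.nodup_cons] at hnd
      by_cases hk : k = algorithm
      · simp only [hk, beq_self_eq_true, if_pos] at hv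
        injection hv with hv
        simp [scanLowerA, hk, hv]
      · simp only [beq_iff_eq, hk, if_false] at hv
        have hmem : (algorithm, v) ∈ rest :=
          PySem.Dict.mem_items_of_get?_eq_some (d := PySem.Dict.mk rest) hv
        have hlow : PySem.Str.lower algorithm ∈ rest.map (fun p => PySem.Str.lower p.1) :=
          List.mem_map_of_mem hmem
        have hne : ¬ PySem.Str.lower k = PySem.Str.lower algorithm := fun h => hnd.1 (h ▸ hlow)
        simp only [scanLowerA, if_neg hne]
        exact ih hnd.2 hv

-- so A is the lowered lookup whenever the input is nonempty
lemma A_eq_lookLow (algorithm : String) (hne : algorithm ≠ "") :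
    get_algorithm_score_py algorithm
      = lookLow (PySem.Str.lower algorithm) ALGORITHM_SCORES_LIST := by
  unfold get_algorithm_score_py
  rw [if_neg hne, ← scan_eq_lookLow]
  cases hv : ALGORITHM_SCORES.get? algorithm with
  | none => rfl
  | some v =>
      exact (scan_of_get?_eq_some algorithm v ALGORITHM_SCORES_LIST lowered_keys_nodup hv).symm

-- binary search only ever returns a value stored next to its own key (no sortedness needed)
lemma bsearch_sound (key : String) (fuel lo hi : Nat) (v : Int)
    (h : bsearchAux key fuel lo hi = some v) : (key, v) ∈ SORTED_TABLE := by
  induction fuel generalizing lo hi with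
  | zero => simp [bsearchAux] at h
  | succ fuel ih =>
      unfold bsearchAux at h
      by_cases hlt : lo < hi
      · simp only [if_pos hlt] at h
        cases hget : SORTED_TABLE[((lo + hi) / 2)]? with
        | none => rw [hget] at h; exact absurd h (by simp)
        | some p =>
            obtain ⟨k, w⟩ := p
            rw [hget] at h
            by_cases hk : k = key
            · simp only [if_pos hk] at h
              injection h with h
              exact hk ▸ h ▸ List.mem_of_getElem? hget
            · simp only [if_neg hk] at h
              by_cases hlt2 : PySem.Chars.strLt k.toList key.toList = true
              · exact ih _ _ (by simpa [hlt2] using h)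
              · exact ih _ _ (by simpa [hlt2] using h)
      · rw [if_neg hlt] at h; exact absurd h (by simp)

-- every key of the sorted table is found at its stored score in the original lowered list
lemma table_in_lookLow : ∀ p ∈ SORTED_TABLE, lookLow p.1 ALGORITHM_SCORES_LIST = p.2 := by
  decide

-- every lowered key of the original list is found by the binary search
lemma bsearch_complete :
    ∀ p ∈ ALGORITHM_SCORES_LIST,
      bsearchAux (PySem.Str.lower p.1) SORTED_TABLE.length 0 SORTED_TABLE.length
        = some p.2 := by
  decide

-- a failed lowered lookup either yields the default or a pair of the lowered list
lemma lookLow_sound (L : String) (ps : List (String × Int)) :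
    lookLow L ps = DEFAULT_ALGORITHM_SCORE
      ∨ ∃ p ∈ ps, PySem.Str.lower p.1 = L ∧ p.2 = lookLow L ps := by
  induction ps with
  | nil => exact Or.inl rfl
  | cons p rest ih =>
      obtain ⟨k, v⟩ := p
      by_cases hk : PySem.Str.lower k = L
      · exact Or.inr ⟨(k, v), by simp [lookLow, hk]⟩
      · rcases ih with h | ⟨q, hq, hql, hqv⟩
        · exact Or.inl (by simpa [lookLow, hk] using h)
        · exact Or.inr ⟨q, by simp [lookLow, hk, hq, hql, hqv]⟩

-- ===== VERDICT (by name: the statement is the Claim_ definition above) =====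
theorem get_algorithm_score_py_spec : Claim_equal_get_algorithm_score_py := by
  intro algorithm _
  unfold Spec_get_algorithm_score_py get_algorithm_score_py_alt
  by_cases he : algorithm = ""
  · simp [get_algorithm_score_py, he]
  · rw [if_neg he, A_eq_lookLow algorithm he]
    cases hb : bsearchAux (PySem.Str.lower algorithm) SORTED_TABLE.length 0 SORTED_TABLE.length with
    | some v =>
        exact table_in_lookLow (PySem.Str.lower algorithm, v) (bsearch_sound _ _ _ _ _ hb)
    | none =>
        rcases lookLow_sound (PySem.Str.lower algorithm) ALGORITHM_SCORES_LIST with h | ⟨p, hp, hpl, hpv⟩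
        · exact h
        · have := bsearch_complete p hp
          rw [hpl, hb] at this
          exact absurd this (by simp)
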